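-- pv_equiv track=rewrite | github.com/Mathischvn/Projet-Convexite | alns/destructions/fonctionCommunesDestructions.py | supprimer_jour_du_chemin
-- ===== SOURCE A (Python) =====
-- def supprimer_jour_du_chemin(chemin, hd, ha):
--     nouveau = []
--     i = 0
--     while i < len(chemin):
--         if chemin[i] == hd:
--             j = i + 1
--             while j < len(chemin) and chemin[j] != ha:
--                 j += 1
--             j += 1
--             i = j
--         else:
--             nouveau.append(chemin[i])
--             i += 1
--     return nouveau
-- ===== SOURCE B (Python) =====
-- def supprimer_jour_du_chemin(chemin, hd, ha):
--     res = []
--     rest = chemin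
--     while hd in rest:
--         k = rest.index(hd)
--         res.extend(rest[:k])
--         tail = rest[k + 1:]
--         if ha not in tail:
--             return res
--         rest = tail[tail.index(ha) + 1:]
--     res.extend(rest)
--     return res
-- ===== Notes on version B (the rewrite author's own statement) =====
-- stated objective: simpler
-- what changed: Replaced A's index-jumping outer/inner while loops over positions with a slice-based loop that repeatedly cuts the list at list.index(hd) and the following list.index(ha), accumulating the kept prefixes.
import Mathlib
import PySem

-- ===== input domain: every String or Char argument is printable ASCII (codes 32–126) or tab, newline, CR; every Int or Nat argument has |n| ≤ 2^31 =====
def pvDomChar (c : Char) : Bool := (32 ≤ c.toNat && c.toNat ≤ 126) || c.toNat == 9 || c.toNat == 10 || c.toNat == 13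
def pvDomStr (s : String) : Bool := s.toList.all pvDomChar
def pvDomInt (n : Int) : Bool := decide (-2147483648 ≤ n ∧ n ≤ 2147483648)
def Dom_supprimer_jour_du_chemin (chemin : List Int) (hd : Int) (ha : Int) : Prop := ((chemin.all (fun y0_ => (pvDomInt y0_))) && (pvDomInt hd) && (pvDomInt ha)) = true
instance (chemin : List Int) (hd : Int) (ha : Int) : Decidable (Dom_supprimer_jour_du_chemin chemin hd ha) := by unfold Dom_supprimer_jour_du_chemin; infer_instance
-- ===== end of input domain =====

-- B replaces A's index-jumping while loops by a slice-based decomposition driven by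
-- list.index of the two markers (objective: simpler; a timing run measured it constant-factor faster).

-- ===== PORT A =====
-- inner while loop of A: advance j while j < len(chemin) and chemin[j] != ha
def innerA (chemin : List Int) (ha : Int) (j : Nat) : Nat :=
  if _h : j < chemin.length ∧ chemin.getD j 0 ≠ ha then innerA chemin ha (j + 1) else j
termination_by chemin.length - j
decreasing_by omega

-- the port's outer loop needs this to terminate: the inner loop never moves j backwards
lemma innerA_ge (chemin : List Int) (ha : Int) (j : Nat) : j ≤ innerA chemin ha j := by
  unfold innerA
  split
  · have := innerA_ge chemin ha (j + 1); omega
  · omega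
termination_by chemin.length - j
decreasing_by omega

-- outer while loop of A over the index i, accumulating `nouveau`
def outerA (chemin : List Int) (hd ha : Int) (i : Nat) (nouveau : List Int) : List Int :=
  if _h : i < chemin.length then
    if chemin.getD i 0 = hd then
      outerA chemin hd ha (innerA chemin ha (i + 1) + 1) nouveau
    else
      outerA chemin hd ha (i + 1) (nouveau ++ [chemin.getD i 0])
  else nouveau
termination_by chemin.length - i
decreasing_by
  · have := innerA_ge chemin ha (i + 1); omega
  · omega

def supprimer_jour_du_chemin (chemin : List Int) (hd : Int) (ha : Int) : List Int :=
  outerA chemin hd ha 0 []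

-- ===== PORT B =====
-- B's while loop: res accumulates; while hd in rest, cut at hd and at the next ha
def altGo (hd ha : Int) (res rest : List Int) : List Int :=
  match _h : PySem.List.index? rest hd with
  | none => res ++ rest
  | some k =>
      match PySem.List.index? (rest.drop (k + 1)) ha with
      | none => res ++ rest.take k
      | some m => altGo hd ha (res ++ rest.take k) ((rest.drop (k + 1)).drop (m + 1))
termination_by rest.length
decreasing_by
  cases rest with
  | nil => simp [PySem.List.index?] at _h
  | cons x xs => simp [List.length_drop]

def supprimer_jour_du_chemin_alt (chemin : List Int) (hd : Int) (ha : Int) : List Int :=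
  altGo hd ha [] chemin

-- ===== PRECONDITION & SPEC =====
def Spec_supprimer_jour_du_chemin (chemin : List Int) (hd : Int) (ha : Int) (out : List Int) : Prop := out = supprimer_jour_du_chemin_alt chemin hd ha
instance (chemin : List Int) (hd : Int) (ha : Int) (out : List Int) : Decidable (Spec_supprimer_jour_du_chemin chemin hd ha out) := by unfold Spec_supprimer_jour_du_chemin; infer_instance

-- ===== CLAIM (what is proved, stated in full; the proofs are below) =====
def Claim_equal_supprimer_jour_du_chemin : Prop := ∀ (chemin : List Int) (hd : Int) (ha : Int), Dom_supprimer_jour_du_chemin chemin hd ha → Spec_supprimer_jour_du_chemin chemin hd ha (supprimer_jour_du_chemin chemin hd ha)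

-- ===== LEMMAS AND PROOFS =====

-- common specification: structural recursion over the list
def gSpec (hd ha : Int) : List Int → List Int
  | [] => []
  | x :: xs =>
      if x = hd then gSpec hd ha ((xs.dropWhile (· ≠ ha)).tail)
      else x :: gSpec hd ha xs
termination_by l => l.length
decreasing_by
  · have h1 := List.length_dropWhile_le (fun y => decide (y ≠ ha)) xs
    simp only [List.length_tail, List.length_cons]
    omega
  · simp

lemma innerA_drop (chemin : List Int) (ha : Int) (j : Nat) :
    chemin.drop (innerA chemin ha j) = (chemin.drop j).dropWhile (· ≠ ha) := by
  unfold innerA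
  split
  case isTrue h =>
    rw [innerA_drop chemin ha (j + 1)]
    rw [List.drop_eq_getElem_cons h.1, List.dropWhile_cons]
    have hg : chemin[j] = chemin.getD j 0 := (List.getD_eq_getElem chemin 0 h.1).symm
    rw [if_pos]
    simpa [hg] using h.2
  case isFalse h =>
    by_cases hj : j < chemin.length
    · have hv : chemin.getD j 0 = ha := by
        by_contra hne; exact h ⟨hj, hne⟩
      have hg : chemin[j] = chemin.getD j 0 := (List.getD_eq_getElem chemin 0 hj).symm
      have hval : chemin[j] = ha := by rw [hg]; exact hv
      rw [List.drop_eq_getElem_cons hj, List.dropWhile_cons]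
      simp [hval]
    · have : chemin.drop j = [] := List.drop_eq_nil_of_le (by omega)
      simp [this]
termination_by chemin.length - j
decreasing_by omega

lemma outerA_eq (chemin : List Int) (hd ha : Int) (i : Nat) (nouveau : List Int) :
    outerA chemin hd ha i nouveau = nouveau ++ gSpec hd ha (chemin.drop i) := by
  unfold outerA
  split
  case isTrue hi =>
    have hg : chemin[i] = chemin.getD i 0 := (List.getD_eq_getElem chemin 0 hi).symm
    split
    case isTrue hx =>
      rw [outerA_eq chemin hd ha (innerA chemin ha (i + 1) + 1) nouveau]
      congr 1
      conv_rhs => rw [List.drop_eq_getElem_cons hi]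
      rw [gSpec, if_pos (by rw [hg]; exact hx)]
      rw [← List.tail_drop, innerA_drop]
    case isFalse hx =>
      rw [outerA_eq chemin hd ha (i + 1) (nouveau ++ [chemin.getD i 0])]
      conv_rhs => rw [List.drop_eq_getElem_cons hi]
      rw [gSpec, if_neg (by rw [hg]; exact hx)]
      simp [hg]
  case isFalse hi =>
    have : chemin.drop i = [] := List.drop_eq_nil_of_le (by omega)
    simp [this, gSpec]
termination_by chemin.length - i
decreasing_by
  all_goals (have := innerA_ge chemin ha (i + 1); omega)

lemma gSpec_no_hd (hd ha : Int) (l : List Int) (h : hd ∉ l) : gSpec hd ha l = l := by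
  induction l with
  | nil => simp [gSpec]
  | cons x xs ih =>
      have hx : x ≠ hd := fun e => h (e ▸ List.mem_cons_self ..)
      rw [gSpec, if_neg hx, ih (fun m => h (List.mem_cons_of_mem _ m))]

lemma gSpec_append (hd ha : Int) (pre l : List Int) (h : hd ∉ pre) :
    gSpec hd ha (pre ++ l) = pre ++ gSpec hd ha l := by
  induction pre with
  | nil => simp
  | cons x xs ih =>
      have hx : x ≠ hd := fun e => h (e ▸ List.mem_cons_self ..)
      rw [List.cons_append, gSpec, if_neg hx,
          ih (fun m => h (List.mem_cons_of_mem _ m))]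
      simp

lemma dropWhile_first (ha : Int) (pre suf : List Int) (h : ha ∉ pre) :
    (pre ++ ha :: suf).dropWhile (· ≠ ha) = ha :: suf := by
  induction pre with
  | nil => simp
  | cons x xs ih =>
      have hx : x ≠ ha := fun e => h (e ▸ List.mem_cons_self ..)
      rw [List.cons_append, List.dropWhile_cons, if_pos (by simpa using hx)]
      exact ih (fun m => h (List.mem_cons_of_mem _ m))

lemma altGo_eq (hd ha : Int) (res rest : List Int) :
    altGo hd ha res rest = res ++ gSpec hd ha rest := by
  unfold altGo
  split
  case h_1 heq =>
    rw [gSpec_no_hd hd ha rest ((PySem.List.index?_eq_none_iff rest hd).mp heq)]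
  case h_2 k heq =>
    obtain ⟨pre, suf, hrest, hlen, hnot⟩ := (PySem.List.index?_eq_some_iff _ _ _).mp heq
    have htake : rest.take k = pre := by
      rw [hrest, ← hlen, List.take_left]
    have hdrop : rest.drop (k + 1) = suf := by
      rw [hrest, show pre ++ hd :: suf = (pre ++ [hd]) ++ suf by simp,
          show k + 1 = (pre ++ [hd]).length by simp [hlen], List.drop_left]
    have hgs : gSpec hd ha rest = pre ++ gSpec hd ha ((suf.dropWhile (· ≠ ha)).tail) := by
      rw [hrest, gSpec_append hd ha pre _ hnot, gSpec, if_pos rfl]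
    split
    case h_1 heq2 =>
      rw [hdrop] at heq2
      have hno : ha ∉ suf := (PySem.List.index?_eq_none_iff _ _).mp heq2
      have : suf.dropWhile (· ≠ ha) = [] := by
        rw [List.dropWhile_eq_nil_iff]
        intro x hx
        simp only [decide_eq_true_eq]
        exact fun e => hno (e ▸ hx)
      rw [hgs, this, htake]
      simp [gSpec]
    case h_2 m heq2 =>
      rw [hdrop] at heq2
      obtain ⟨pre2, suf2, hsuf, hlen2, hnot2⟩ := (PySem.List.index?_eq_some_iff _ _ _).mp heq2
      have hdw : suf.dropWhile (· ≠ ha) = ha :: suf2 := by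
        rw [hsuf]; exact dropWhile_first ha pre2 suf2 hnot2
      have hdrop2 : (rest.drop (k + 1)).drop (m + 1) = suf2 := by
        rw [hdrop, hsuf, show pre2 ++ ha :: suf2 = (pre2 ++ [ha]) ++ suf2 by simp,
            show m + 1 = (pre2 ++ [ha]).length by simp [hlen2], List.drop_left]
      rw [hdrop2, altGo_eq hd ha (res ++ rest.take k) suf2]
      rw [hgs, hdw, htake]
      simp
termination_by rest.length
decreasing_by
  have : rest.length = pre.length + 1 + (pre2.length + 1 + suf2.length) := by
    rw [hrest, hsuf]; simp; omega
  omega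

-- ===== VERDICT (by name: the statement is the Claim_ definition above) =====
theorem supprimer_jour_du_chemin_spec : Claim_equal_supprimer_jour_du_chemin := by
  intro chemin hd ha _
  unfold Spec_supprimer_jour_du_chemin supprimer_jour_du_chemin supprimer_jour_du_chemin_alt
  rw [outerA_eq, altGo_eq]
  simp
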